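-- pv_equiv track=rewrite | github.com/IAMebonyhope/python-15-days-of-code | day11.py | compressor
-- ===== SOURCE A (Python) =====
-- def compressor(numbers):
--   numbers_dict = {}
--
--   for ch in numbers:
--     if ch.isdigit():
--       number = int(ch)
--       if number in numbers_dict:
--         numbers_dict[number] += 1
--       else:
--         numbers_dict[number] = 1
--
--   return tuple(numbers_dict.items())
-- ===== SOURCE B (Python) =====
-- def compressor(numbers):
--   digits = [int(ch) for ch in numbers if ch.isdigit()]
--   uniq = [d for d in range(10) if d in digits]
--   order = sorted(uniq, key=digits.index)
--   return tuple((d, digits.count(d)) for d in order)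
-- ===== Notes on version B (the rewrite author's own statement) =====
-- stated objective: alternative
-- what changed: Instead of A's single pass that grows a dict in insertion order, B enumerates the fixed value space range(10), keeps the digits that occur, sorts them by first-occurrence index (digits.index) and counts each with list.count.
import Mathlib
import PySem

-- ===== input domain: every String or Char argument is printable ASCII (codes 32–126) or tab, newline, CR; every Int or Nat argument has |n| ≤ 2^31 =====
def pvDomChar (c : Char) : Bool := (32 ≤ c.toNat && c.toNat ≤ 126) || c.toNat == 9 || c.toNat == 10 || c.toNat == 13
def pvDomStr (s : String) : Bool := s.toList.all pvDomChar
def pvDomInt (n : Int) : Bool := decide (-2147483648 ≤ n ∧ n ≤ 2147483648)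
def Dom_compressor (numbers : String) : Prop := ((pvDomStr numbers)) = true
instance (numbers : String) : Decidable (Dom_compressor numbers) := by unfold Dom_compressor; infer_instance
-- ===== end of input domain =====

-- B replaces A's incremental dict-counting loop by enumerating the fixed value space 0..9, filtering it to the present digits, sorting those by first-occurrence index and counting each with list.count: a different algorithm of similar cost.


-- ===== PORT A =====
-- int(ch) for a single digit char: PySem.Int.ofChars? [ch]; after isdigit it never fails, the .getD 0 is a totalising guard only
def compressor (numbers : String) : List (Int × Int) :=
  (numbers.toList.foldl
    (fun d ch =>
      if PySem.Chars.isdigit ch then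
        let number : Int := (PySem.Int.ofChars? [ch]).getD 0
        if d.contains number then d.insert number (d.getD number 0 + 1)
        else d.insert number 1
      else d)
    (PySem.Dict.empty : PySem.Dict Int Int)).items

-- ===== PORT B =====
-- digits.index(d) is PySem.List.index?; d is always in digits where the key is evaluated, the .getD 0 is a totalising guard only
def compressor_alt (numbers : String) : List (Int × Int) :=
  let digits : List Int :=
    (numbers.toList.filter (fun ch => PySem.Chars.isdigit ch)).map
      (fun ch => (PySem.Int.ofChars? [ch]).getD 0)
  let uniq : List Int := (PySem.List.pyRange 0 10 1).filter (fun d => digits.contains d)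
  let order : List Int :=
    PySem.List.sorted uniq (fun d => (((PySem.List.index? digits d).getD 0 : Nat) : Int)) false
  order.map (fun d => (d, (digits.count d : Int)))

-- ===== PRECONDITION & SPEC =====
def Spec_compressor (numbers : String) (out : List (Int × Int)) : Prop := out = compressor_alt numbers
instance (numbers : String) (out : List (Int × Int)) : Decidable (Spec_compressor numbers out) := by unfold Spec_compressor; infer_instance

-- ===== CLAIM (what is proved, stated in full; the proofs are below) =====
def Claim_equal_compressor : Prop := ∀ (numbers : String), Dom_compressor numbers → Spec_compressor numbers (compressor numbers)

-- ===== LEMMAS AND PROOFS =====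

-- ---- A side: the loop is Counter(digits), so compressor = dedup-map-count ----

-- if the key is absent, getD gives the default
theorem pv_getD_of_not_contains (d : PySem.Dict Int Int) (k : Int)
    (h : d.contains k = false) : d.getD k 0 = 0 := by
  have hn : d.get? k = none := by
    have hc := PySem.Dict.contains_eq_isSome_get? (d := d) (k := k)
    rw [h] at hc
    exact Option.not_isSome_iff_eq_none.mp (by simp [← hc])
  simp [PySem.Dict.getD, hn]

-- A's branch (present: bump, absent: set to 1) is exactly 'insert k (getD k 0 + 1)'
theorem pv_branch_eq (d : PySem.Dict Int Int) (k : Int) :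
    (if d.contains k then d.insert k (d.getD k 0 + 1) else d.insert k 1) =
      d.insert k (d.getD k 0 + 1) := by
  by_cases h : d.contains k = true
  · simp [h]
  · have h' : d.contains k = false := by simpa using h
    simp [h', pv_getD_of_not_contains d k h']

-- folding the guarded step over the chars = folding the plain step over filter-then-map
theorem pv_foldl_filter_map (l : List Char) (d : PySem.Dict Int Int) :
    l.foldl
      (fun d ch =>
        if PySem.Chars.isdigit ch then
          let number : Int := (PySem.Int.ofChars? [ch]).getD 0
          if d.contains number then d.insert number (d.getD number 0 + 1)
          else d.insert number 1
        else d) d =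
    ((l.filter (fun ch => PySem.Chars.isdigit ch)).map
        (fun ch => (PySem.Int.ofChars? [ch]).getD 0)).foldl
      (fun d x => d.insert x (d.getD x 0 + 1)) d := by
  induction l generalizing d with
  | nil => rfl
  | cons c t ih =>
    by_cases h : PySem.Chars.isdigit c = true
    · simp only [List.foldl_cons, List.filter_cons, h, if_pos, List.map_cons]
      rw [pv_branch_eq]
      exact ih _
    · simp only [List.foldl_cons, List.filter_cons, h]
      simpa [h] using ih d

theorem pv_compressor_eq_canon (numbers : String) :
    compressor numbers =
      (PySem.Set.ofList
          ((numbers.toList.filter (fun ch => PySem.Chars.isdigit ch)).map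
            (fun ch => (PySem.Int.ofChars? [ch]).getD 0))).map
        (fun k => (k,
          (((numbers.toList.filter (fun ch => PySem.Chars.isdigit ch)).map
              (fun ch => (PySem.Int.ofChars? [ch]).getD 0)).count k : Int))) := by
  unfold compressor
  rw [pv_foldl_filter_map]
  rw [PySem.Dict.foldl_insert_getD_add_one_eq_counter]
  rw [PySem.Dict.items_counter]

-- ---- B side: bringing the sorted-by-first-index list to first-insertion (Set.ofList) order ----

-- a digit char's value is one of 0..9
theorem pv_digit_char_cases (c : Char) (h : PySem.Chars.isdigit c = true) :
    c = '0' ∨ c = '1' ∨ c = '2' ∨ c = '3' ∨ c = '4' ∨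
    c = '5' ∨ c = '6' ∨ c = '7' ∨ c = '8' ∨ c = '9' := by
  simp only [PySem.Chars.isdigit, Bool.and_eq_true, decide_eq_true_eq] at h
  obtain ⟨h1, h2⟩ := h
  have hl : 48 ≤ c.toNat := h1
  have hr : c.toNat ≤ 57 := h2
  have hofn : c = Char.ofNat c.toNat := (Char.ofNat_toNat c).symm
  interval_cases hn : c.toNat <;> (rw [hofn]; decide)

theorem pv_digit_val_mem_range (c : Char) (h : PySem.Chars.isdigit c = true) :
    (PySem.Int.ofChars? [c]).getD 0 ∈ PySem.List.pyRange 0 10 1 := by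
  rcases pv_digit_char_cases c h with h|h|h|h|h|h|h|h|h|h <;> subst h <;> decide

-- ofList over an appended element
theorem pv_ofList_append_singleton (xs : List Int) (y : Int) :
    PySem.Set.ofList (xs ++ [y]) = PySem.Set.add (PySem.Set.ofList xs) y := by
  simp [PySem.Set.ofList_eq_foldl, List.foldl_append]

-- members of ofList xs have an index in xs below its length
theorem pv_index_lt_length (xs : List Int) (a : Int) (ha : a ∈ xs) :
    ∃ k, PySem.List.index? xs a = some k ∧ k < xs.length := by
  have hs : (PySem.List.index? xs a).isSome := (PySem.List.index?_isSome_iff xs a).mpr ha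
  obtain ⟨k, hk⟩ := Option.isSome_iff_exists.mp hs
  obtain ⟨hlt, -, -⟩ := PySem.List.getElem_of_index?_eq_some hk
  exact ⟨k, hk, hlt⟩

-- first-insertion order is first-occurrence-index order
theorem pv_ofList_pairwise_index (xs : List Int) :
    (PySem.Set.ofList xs).Pairwise
      (fun a b => (((PySem.List.index? xs a).getD 0 : Nat) : Int) <
                  (((PySem.List.index? xs b).getD 0 : Nat) : Int)) := by
  induction xs using List.reverseRecOn with
  | nil => simp [PySem.Set.ofList]
  | append_singleton l y ih =>
    rw [pv_ofList_append_singleton]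
    by_cases hy : y ∈ l
    · have hmem : PySem.Set.contains (PySem.Set.ofList l) y = true := by
        simpa [PySem.Set.contains] using (PySem.Set.mem_ofList l y).mpr hy
      rw [PySem.Set.add, hmem, if_pos rfl]
      refine ih.imp_of_mem ?_
      intro a b hal hbl hab
      have ha : a ∈ l := (PySem.Set.mem_ofList l a).mp hal
      have hb : b ∈ l := (PySem.Set.mem_ofList l b).mp hbl
      rwa [PySem.List.index?_append_of_mem [y] ha, PySem.List.index?_append_of_mem [y] hb]
    · have hmem : PySem.Set.contains (PySem.Set.ofList l) y = false := by
        simp [PySem.Set.contains, PySem.Set.mem_ofList, hy]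
      rw [PySem.Set.add, hmem]
      simp only [Bool.false_eq_true, if_false]
      rw [List.pairwise_append]
      refine ⟨?_, List.pairwise_singleton _ _, ?_⟩
      · refine ih.imp_of_mem ?_
        intro a b hal hbl hab
        have ha : a ∈ l := (PySem.Set.mem_ofList l a).mp hal
        have hb : b ∈ l := (PySem.Set.mem_ofList l b).mp hbl
        rwa [PySem.List.index?_append_of_mem [y] ha, PySem.List.index?_append_of_mem [y] hb]
      · intro a hal b hb1
        have ha : a ∈ l := (PySem.Set.mem_ofList l a).mp hal
        have hb : b = y := by simpa using hb1
        rw [hb]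
        obtain ⟨k, hk, hklt⟩ := pv_index_lt_length l a ha
        rw [PySem.List.index?_append_of_mem [y] ha, hk,
          PySem.List.index?_append_singleton_self l y hy]
        simpa using (Int.ofNat_lt.mpr hklt)

-- the filtered value-space list is a permutation of the first-insertion dedup
theorem pv_perm_filter_range (xs : List Int)
    (hb : ∀ x ∈ xs, x ∈ PySem.List.pyRange 0 10 1) :
    (PySem.Set.ofList xs).Perm
      ((PySem.List.pyRange 0 10 1).filter (fun d => xs.contains d)) := by
  rw [List.perm_ext_iff_of_nodup (PySem.Set.nodup_ofList xs)
    (List.Nodup.filter _ (by decide))]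
  intro a
  simp only [PySem.Set.mem_ofList, List.mem_filter, List.contains_iff_mem]
  exact ⟨fun h => ⟨hb a h, h⟩, fun h => h.2⟩

-- B's sorted-by-first-index order IS the first-insertion order
theorem pv_sorted_eq_ofList (xs : List Int)
    (hb : ∀ x ∈ xs, x ∈ PySem.List.pyRange 0 10 1) :
    PySem.List.sorted ((PySem.List.pyRange 0 10 1).filter (fun d => xs.contains d))
        (fun d => (((PySem.List.index? xs d).getD 0 : Nat) : Int)) false =
      PySem.Set.ofList xs :=
  PySem.List.sorted_eq_of_perm_of_pairwise_lt _ _ _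
    (pv_perm_filter_range xs hb) (pv_ofList_pairwise_index xs)

theorem compressor_eq (numbers : String) : compressor numbers = compressor_alt numbers := by
  rw [pv_compressor_eq_canon]
  unfold compressor_alt
  simp only []
  rw [pv_sorted_eq_ofList]
  intro x hx
  simp only [List.mem_map, List.mem_filter] at hx
  obtain ⟨c, ⟨-, hc⟩, rfl⟩ := hx
  exact pv_digit_val_mem_range c hc

-- ===== VERDICT (by name: the statement is the Claim_ definition above) =====
theorem compressor_spec : Claim_equal_compressor := by
  intro numbers _
  unfold Spec_compressor
  exact compressor_eq numbers
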